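-- pv_equiv track=rewrite | github.com/15ksahota-rlh/ad-repurposer | review_mining/scraper.py | _extract_asin
-- ===== SOURCE A (Python) =====
-- def _extract_asin(url: str) -> str:
--     """Pull the ASIN out of a standard Amazon product or review URL."""
--     for segment in url.split("/"):
--         if segment.startswith("B0") and len(segment) == 10:
--             return segment
--         if segment == "dp" or segment == "product-reviews":
--             continue
--     # Fallback: look for /dp/<ASIN> pattern
--     parts = url.split("/dp/")
--     if len(parts) > 1:
--         return parts[1].split("/")[0].split("?")[0]
--     raise ValueError(f"Cannot extract ASIN from URL: {url}")
-- ===== SOURCE B (Python) =====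
-- def _extract_asin(url: str) -> str:
--     # Single index-based character scan over the URL (no intermediate segment
--     # lists): walk '/'-delimited segments in place, then a one-pass fallback
--     # after the first dp marker that stops at the first slash or question mark.
--     n = len(url)
--     i = 0
--     while i <= n:
--         j = i
--         while j < n and url[j] != "/":
--             j += 1
--         if j - i == 10 and url.startswith("B0", i):
--             return url[i:j]
--         i = j + 1
--     pos = url.find("/dp/")
--     if pos < 0:
--         raise ValueError(f"Cannot extract ASIN from URL: {url}")
--     tail = url[pos + 4:]
--     end = 0
--     while end < len(tail) and tail[end] != "/" and tail[end] != "?":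
--         end += 1
--     return tail[:end]
-- ===== Notes on version B (the rewrite author's own statement) =====
-- stated objective: alternative
-- what changed: Replaces the two split()-built intermediate lists (segment iteration and the dp-fallback's split/split chain) with a single index-based character scan over the URL, the fallback truncating in one pass at the first slash or question mark.
import Mathlib
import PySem

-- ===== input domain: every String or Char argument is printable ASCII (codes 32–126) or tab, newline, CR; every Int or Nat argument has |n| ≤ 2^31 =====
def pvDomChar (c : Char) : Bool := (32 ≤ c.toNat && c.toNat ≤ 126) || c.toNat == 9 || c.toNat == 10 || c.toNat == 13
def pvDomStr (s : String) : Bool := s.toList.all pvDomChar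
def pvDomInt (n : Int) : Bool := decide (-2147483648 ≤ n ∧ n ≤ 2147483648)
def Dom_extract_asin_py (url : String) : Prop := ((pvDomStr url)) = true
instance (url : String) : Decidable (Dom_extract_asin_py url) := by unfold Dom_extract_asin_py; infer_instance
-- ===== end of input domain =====

-- B replaces A's two split()-built segment lists by a single index-based character scan
-- (one-pass fallback stopping at the first slash or question mark); equal values proved on
-- Pre_ (outside Pre_ the Python originals raise ValueError).

-- ===== PORT A =====
-- the 'for segment in url.split("/")' loop, with the (no-op) 'continue' branches kept
def pvLoopA : List (List Char) → Option (List Char)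
  | [] => none
  | seg :: rest =>
    if PySem.Chars.startswith seg ['B', '0'] && seg.length == 10 then some seg
    else if seg == ['d', 'p'] || seg == ['p','r','o','d','u','c','t','-','r','e','v','i','e','w','s'] then
      pvLoopA rest   -- 'continue'
    else pvLoopA rest

def extract_asin_py (url : String) : String :=
  match pvLoopA (PySem.Chars.splitOn url.toList ['/']) with
  | some seg => String.ofList seg
  | none =>
    let parts := PySem.Chars.splitOn url.toList ['/', 'd', 'p', '/']
    if 1 < parts.length then
      String.ofList ((PySem.Chars.splitOn ((PySem.Chars.splitOn (parts.getD 1 []) ['/']).headD []) ['?']).headD [])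
    else ""   -- Python raises ValueError here; excluded by Pre_

-- ===== PORT B =====
-- outer while-loop of Source B: the inner 'j' while-loop is the span of non-'/' chars,
-- 'i = j + 1' advances past the separator
def pvScan (cs : List Char) : Option (List Char) :=
  let seg := cs.takeWhile (fun a => !(a == '/'))
  if seg.length == 10 && ['B', '0'].isPrefixOf seg then some seg
  else
    match h : cs.dropWhile (fun a => !(a == '/')) with
    | [] => none
    | _ :: t => pvScan t
termination_by cs.length
decreasing_by
  have h1 := List.length_dropWhile_le (fun a : Char => !(a == '/')) cs
  rw [h] at h1; simp at h1; omega

def extract_asin_py_alt (url : String) : String :=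
  match pvScan url.toList with
  | some seg => String.ofList seg
  | none =>
    let pos := PySem.Chars.find url.toList ['/', 'd', 'p', '/']
    if pos < 0 then ""   -- Python raises ValueError here; excluded by Pre_
    else
      -- the 'end' while-loop of Source B: takeWhile of chars that are neither '/' nor '?'
      String.ofList ((url.toList.drop (pos.toNat + 4)).takeWhile
        (fun a => !(a == '/') && !(a == '?')))

-- ===== PRECONDITION & SPEC =====
-- Pre_ excludes exactly the URLs on which Python A raises ValueError: no '/'-separated
-- segment is a 10-char token starting with "B0" and "/dp/" does not occur in the URL.
def Pre_extract_asin_py (url : String) : Prop :=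
  (∃ seg ∈ PySem.Chars.splitOn url.toList ['/'], seg.length = 10 ∧ ['B', '0'] <+: seg)
  ∨ PySem.Str.isIn "/dp/" url = true
instance (url : String) : Decidable (Pre_extract_asin_py url) := by unfold Pre_extract_asin_py; infer_instance

def pvWitness_extract_asin_py : String := "https://www.amazon.com/dp/B0ABCDEFGH"

def Spec_extract_asin_py (url : String) (out : String) : Prop := out = extract_asin_py_alt url
instance (url : String) (out : String) : Decidable (Spec_extract_asin_py url out) := by unfold Spec_extract_asin_py; infer_instance

-- ===== CLAIM (what is proved, stated in full; the proofs are below) =====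
def Claim_equal_extract_asin_py : Prop := ∀ (url : String), Dom_extract_asin_py url → Pre_extract_asin_py url → Spec_extract_asin_py url (extract_asin_py url)

-- ===== LEMMAS AND PROOFS =====

-- structural model of PySem.Chars.splitOn for a nonempty separator c :: s
def splitG (c : Char) (s : List Char) : List Char → List (List Char)
  | [] => [[]]
  | a :: l =>
    if (c :: s).isPrefixOf (a :: l) then
      [] :: splitG c s (l.drop s.length)
    else
      match splitG c s l with
      | [] => [[a]]
      | x :: xs => (a :: x) :: xs
termination_by l => l.length
decreasing_by
  all_goals simp [List.length_drop]

def consHead (p : List Char) : List (List Char) → List (List Char)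
  | [] => [p]
  | x :: xs => (p ++ x) :: xs

lemma splitG_exists_cons (c : Char) (s : List Char) (l : List Char) :
    ∃ x xs, splitG c s l = x :: xs := by
  cases l with
  | nil => exact ⟨[], [], by rw [splitG]⟩
  | cons a l =>
    rw [splitG]
    split
    · exact ⟨[], _, rfl⟩
    · rcases h : splitG c s l with _ | ⟨x, xs⟩ <;> simp

lemma go_eq (c : Char) (s : List Char) :
    ∀ (fuel : Nat) (l cur : List Char) (acc : List (List Char)), l.length < fuel →
      PySem.Chars.splitOn.go (c :: s) fuel l cur acc
        = acc.reverse ++ consHead cur.reverse (splitG c s l) := by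
  intro fuel
  induction fuel with
  | zero => intro l cur acc h; omega
  | succ fuel ih =>
    intro l cur acc h
    rw [PySem.Chars.splitOn.go.eq_def]
    cases l with
    | nil => simp [splitG, consHead]
    | cons a l =>
      simp only []
      by_cases hp : (c :: s).isPrefixOf (a :: l) = true
      · rw [if_pos hp, ih _ _ _ (by simp [List.length_drop] at h ⊢; omega)]
        rw [splitG, if_pos hp]
        have hd : List.drop (c :: s).length (a :: l) = List.drop s.length l := by
          simp [List.drop_succ_cons]
        obtain ⟨x, xs, hx⟩ := splitG_exists_cons c s (List.drop s.length l)
        rw [hd, hx]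
        simp [consHead]
      · rw [if_neg hp, ih _ _ _ (by simp at h ⊢; omega)]
        rw [splitG, if_neg hp]
        obtain ⟨x, xs, hx⟩ := splitG_exists_cons c s l
        rw [hx]
        simp [consHead]

lemma splitOn_eq (c : Char) (s : List Char) (l : List Char) :
    PySem.Chars.splitOn l (c :: s) = splitG c s l := by
  rw [PySem.Chars.splitOn, go_eq c s _ _ _ _ (by omega)]
  obtain ⟨x, xs, hx⟩ := splitG_exists_cons c s l
  rw [hx]; simp [consHead]

lemma splitG_single (c : Char) (l : List Char) :
    splitG c [] l = l.takeWhile (fun a => !(a == c)) ::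
      (match l.dropWhile (fun a => !(a == c)) with
       | [] => []
       | _ :: t => splitG c [] t) := by
  induction l with
  | nil => rw [splitG]; simp
  | cons a l ih =>
    rw [splitG]
    by_cases hac : a = c
    · subst hac
      rw [if_pos (by simp [List.isPrefixOf])]
      simp
    · rw [if_neg (by simp [List.isPrefixOf]; exact fun hh => absurd hh.symm hac)]
      rw [ih]
      simp [hac]

lemma takeWhile_append_cons (p : Char → Bool) (b : Char) (hb : p b = false) :
    ∀ (l₁ l₂ : List Char), (l₁ ++ b :: l₂).takeWhile p = l₁.takeWhile p := by
  intro l₁ l₂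
  induction l₁ with
  | nil => simp [hb]
  | cons a l ih =>
    by_cases hp : p a <;> simp [hp, ih]

lemma splitG_head (c : Char) (s : List Char) : ∀ (l : List Char),
    ∃ x xs, splitG c s l = x :: xs ∧
      (x = l ∨ ∃ l₂, l = x ++ l₂ ∧ (c :: s) <+: l₂) := by
  intro l
  induction l with
  | nil => exact ⟨[], [], by rw [splitG], Or.inl rfl⟩
  | cons a l ih =>
    rw [splitG]
    by_cases hp : (c :: s).isPrefixOf (a :: l) = true
    · rw [if_pos hp]
      exact ⟨[], _, rfl, Or.inr ⟨a :: l, rfl, List.isPrefixOf_iff_prefix.mp hp⟩⟩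
    · rw [if_neg hp]
      obtain ⟨x, xs, hx, hcase⟩ := ih
      rw [hx]
      refine ⟨a :: x, xs, rfl, ?_⟩
      rcases hcase with h1 | ⟨l₂, hl₂, hpre⟩
      · exact Or.inl (by rw [h1])
      · exact Or.inr ⟨l₂, by rw [hl₂]; simp, hpre⟩

lemma one_lt_splitG_iff (c : Char) (s : List Char) : ∀ (l : List Char),
    1 < (splitG c s l).length ↔ (c :: s) <:+: l := by
  intro l
  induction l with
  | nil =>
    rw [splitG]
    simp
  | cons a l ih =>
    rw [splitG]
    by_cases hp : (c :: s).isPrefixOf (a :: l) = true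
    · rw [if_pos hp]
      obtain ⟨x, xs, hx⟩ := splitG_exists_cons c s (List.drop s.length l)
      simp only [hx, List.length_cons]
      constructor
      · intro _; exact (List.isPrefixOf_iff_prefix.mp hp).isInfix
      · intro _; omega
    · rw [if_neg hp]
      obtain ⟨x, xs, hx⟩ := splitG_exists_cons c s l
      rw [hx]
      rw [List.infix_cons_iff]
      simp only [List.length_cons] at *
      constructor
      · intro h1
        exact Or.inr (ih.mp (by rw [hx]; simp; omega))
      · intro h1
        rcases h1 with h1 | h1
        · exact absurd (List.isPrefixOf_iff_prefix.mpr h1) (by simpa using hp)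
        · have := ih.mpr h1
          rw [hx] at this; simp at this ⊢; omega

lemma splitG_first (c : Char) (s : List Char) : ∀ (l : List Char) (k : Nat),
    (∀ i, i < k → ¬ (c :: s) <+: l.drop i) → (c :: s) <+: l.drop k →
    splitG c s l = l.take k :: splitG c s (l.drop (k + (s.length + 1))) := by
  intro l
  induction l with
  | nil =>
    intro k _ hk
    simp at hk
  | cons a l ih =>
    intro k hmin hk
    cases k with
    | zero =>
      rw [List.drop_zero] at hk
      rw [splitG, if_pos (List.isPrefixOf_iff_prefix.mpr hk)]
      rw [List.take_zero, Nat.zero_add, List.drop_succ_cons]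
    | succ k =>
      have h0 : ¬ (c :: s) <+: (a :: l) := hmin 0 (by omega)
      rw [splitG, if_neg (by simpa using fun hh => h0 (List.isPrefixOf_iff_prefix.mp hh))]
      rw [ih k (fun i hi => hmin (i+1) (by omega)) (by simpa using hk)]
      rw [List.take_succ_cons]
      rw [show k + 1 + (s.length + 1) = (k + (s.length + 1)) + 1 by omega, List.drop_succ_cons]

lemma startswith_B0 (seg : List Char) :
    PySem.Chars.startswith seg ['B', '0'] = ['B', '0'].isPrefixOf seg := by
  have h1 := PySem.Chars.startswith_iff seg ['B', '0']
  have h2 := @List.isPrefixOf_iff_prefix Char _ _ ['B', '0'] seg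
  rw [Bool.eq_iff_iff, h1, h2]

lemma loopA_cons (seg : List Char) (rest : List (List Char)) :
    pvLoopA (seg :: rest) = (if (seg.length == 10 && ['B', '0'].isPrefixOf seg) = true
      then some seg else pvLoopA rest) := by
  rw [pvLoopA, startswith_B0, Bool.and_comm]
  split
  · rfl
  · rw [ite_self]

lemma scan_eq_aux : ∀ (n : Nat) (l : List Char), l.length ≤ n →
    pvLoopA (splitG '/' [] l) = pvScan l := by
  intro n
  induction n with
  | zero =>
    intro l hl
    have : l = [] := by cases l <;> simp at hl ⊢
    subst this
    rw [splitG, pvScan]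
    simp [pvLoopA, PySem.Chars.startswith, List.isPrefixOf]
  | succ n ih =>
    intro l hl
    rw [splitG_single, loopA_cons, pvScan]
    by_cases hc : ((l.takeWhile (fun a => !(a == '/'))).length == 10
        && ['B', '0'].isPrefixOf (l.takeWhile (fun a => !(a == '/')))) = true
    · simp only [if_pos hc]
    · simp only [if_neg hc]
      cases hd : l.dropWhile (fun a => !(a == '/')) with
      | nil => rfl
      | cons b t =>
        have h1 := List.length_dropWhile_le (fun a : Char => !(a == '/')) l
        rw [hd] at h1
        simp at h1
        exact ih t (by omega)

lemma scan_eq (l : List Char) : pvLoopA (splitG '/' [] l) = pvScan l :=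
  scan_eq_aux l.length l (by omega)

lemma tw2 (z : List Char) :
    (z.takeWhile (fun a => !(a == '/'))).takeWhile (fun a => !(a == '?'))
      = z.takeWhile (fun a => !(a == '/') && !(a == '?')) := by
  induction z with
  | nil => rfl
  | cons a z ih =>
    by_cases h1 : a = '/'
    · subst h1; simp
    · by_cases h2 : a = '?'
      · subst h2; simp
      · simp [h1, h2, ih]

lemma fallback_eq (l : List Char) :
    (let parts := splitG '/' ['d', 'p', '/'] l
     if 1 < parts.length then
       String.ofList ((PySem.Chars.splitOn ((PySem.Chars.splitOn (parts.getD 1 []) ['/']).headD []) ['?']).headD [])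
     else "")
    = (let pos := PySem.Chars.find l ['/', 'd', 'p', '/']
       if pos < 0 then ""
       else
         String.ofList ((l.drop (pos.toNat + 4)).takeWhile
           (fun a => !(a == '/') && !(a == '?')))) := by
  simp only []
  by_cases hin : ('/' :: ['d', 'p', '/'] : List Char) <:+: l
  · have hfind0 : (0 : Int) ≤ PySem.Chars.find l ['/', 'd', 'p', '/'] := by
      rw [PySem.Chars.find_nonneg_iff]
      exact hin
    obtain ⟨hpre, hmin⟩ := PySem.Chars.find_spec (s := l) (sub := ['/', 'd', 'p', '/']) hfind0
    set k := (PySem.Chars.find l ['/', 'd', 'p', '/']).toNat with hk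
    have hsplit := splitG_first '/' ['d', 'p', '/'] l k hmin hpre
    have hlen4 : (['d', 'p', '/'] : List Char).length + 1 = 4 := rfl
    rw [hlen4] at hsplit
    obtain ⟨x, xs, hx, hcase⟩ := splitG_head '/' ['d', 'p', '/'] (l.drop (k + 4))
    rw [if_pos (by rw [hsplit, hx]; simp), if_neg (by omega)]
    have hgd : (splitG '/' ['d', 'p', '/'] l).getD 1 [] = x := by
      rw [hsplit, hx]; rfl
    rw [hgd]
    -- A's two headD-of-splitOn are two nested takeWhiles
    rw [splitOn_eq '/' [], splitG_single]
    simp only [List.headD_cons]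
    rw [splitOn_eq '?' [], splitG_single]
    simp only [List.headD_cons]
    rw [tw2]
    -- the takeWhile over x equals the takeWhile over the whole tail after "/dp/"
    rcases hcase with rfl | ⟨l₂, hl₂, hpre₂⟩
    · rfl
    · obtain ⟨t2, ht2⟩ := hpre₂
      rw [hl₂, ← ht2]
      rw [show ('/' :: ['d', 'p', '/'] : List Char) ++ t2 = '/' :: (['d', 'p', '/'] ++ t2) from rfl]
      rw [takeWhile_append_cons _ '/' (by decide)]
  · have hfind : PySem.Chars.find l ['/', 'd', 'p', '/'] = -1 := by
      rw [PySem.Chars.find_eq_neg_one_iff]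
      exact hin
    rw [if_neg (by rw [← one_lt_splitG_iff '/' ['d', 'p', '/'] l] at hin; exact hin),
      hfind, if_pos (by omega)]

lemma main_eq (url : String) : extract_asin_py url = extract_asin_py_alt url := by
  unfold extract_asin_py extract_asin_py_alt
  rw [splitOn_eq '/' [], scan_eq]
  cases hscan : pvScan url.toList with
  | some seg => rfl
  | none =>
    simp only []
    rw [splitOn_eq '/' ['d', 'p', '/']]
    exact fallback_eq url.toList

-- ===== VERDICT (by name: the statement is the Claim_ definition above) =====
theorem extract_asin_py_spec : Claim_equal_extract_asin_py := by
  intro url _hdom _hpre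
  unfold Spec_extract_asin_py
  exact main_eq url
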